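-- pv_equiv track=rewrite | github.com/emirerben/nova | src/apps/api/app/pipeline/single_pass.py | _group_by_concat_runs
-- ===== SOURCE A (Python) =====
-- def _group_by_concat_runs(transitions: list[str]) -> list[list[int]]:
--     """Group adjacent slot indices into concat sub-batches.
--
--     Each group is a maximal run of slots joined by ``"none"`` transitions
--     (hard-cut). Groups are separated by visual transitions, which become
--     xfade boundaries between the groups in :func:`_build_xfade_chain`.
--
--     Example: ``transitions=["none", "crossfade", "none"]`` (4 slots) →
--     ``[[0, 1], [2, 3]]`` — slots 0+1 concat into the first group, slots 2+3
--     concat into the second, and the crossfade boundary bridges them.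
--
--     Why mirror the multi-pass grouping: ``transitions.py:join_with_transitions``
--     rejects ``"none"`` precisely because chaining many low-duration xfade
--     filters caused FFmpeg to drop frames and truncate long outputs to 3-4s
--     on the 17-slot Dimples Passport recipe. Concat-then-xfade keeps the
--     xfade-filter count bounded by the number of *visual* transitions,
--     independent of slot count.
--     """
--     groups: list[list[int]] = [[0]]
--     for i, trans in enumerate(transitions):
--         if trans == "none":
--             groups[-1].append(i + 1)
--         else:
--             groups.append([i + 1])
--     return groups
-- ===== SOURCE B (Python) =====
-- def _group_by_concat_runs(transitions: list[str]) -> list[list[int]]: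
--     """Boundary-first grouping: collect cut indices, then slice index ranges."""
--     n = len(transitions) + 1
--     cuts = [i + 1 for i, t in enumerate(transitions) if t != "none"]
--     groups = []
--     prev = 0
--     for c in cuts + [n]:
--         groups.append(list(range(prev, c)))
--         prev = c
--     return groups
-- ===== Notes on version B (the rewrite author's own statement) =====
-- stated objective: alternative
-- what changed: B first materializes the cut positions (indices after non-'none' transitions) in one comprehension and then builds each group as a contiguous range slice between consecutive cuts, instead of A's incremental append-to-last-group loop.
import Mathlib
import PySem

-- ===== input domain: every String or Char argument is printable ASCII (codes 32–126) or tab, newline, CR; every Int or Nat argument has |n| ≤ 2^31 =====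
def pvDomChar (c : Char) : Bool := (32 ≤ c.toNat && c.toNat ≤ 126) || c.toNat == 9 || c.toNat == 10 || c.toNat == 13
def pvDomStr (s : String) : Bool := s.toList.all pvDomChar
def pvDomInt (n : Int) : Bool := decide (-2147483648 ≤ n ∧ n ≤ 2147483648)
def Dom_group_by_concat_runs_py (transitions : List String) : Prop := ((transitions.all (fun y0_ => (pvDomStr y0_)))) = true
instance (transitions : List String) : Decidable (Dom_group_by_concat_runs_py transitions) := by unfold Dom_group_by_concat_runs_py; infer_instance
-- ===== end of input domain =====

-- B builds groups boundary-first (collect cut indices, then slice ranges) instead of A's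
-- append-to-last-group loop; objective: alternative decomposition, same O(n) cost.

-- ===== PORT A =====
-- groups[-1].append(x): mutate the last inner list in place ([] case unreachable: state starts at [[0]])
def pyAppendLast (gs : List (List Int)) (x : Int) : List (List Int) :=
  match gs with
  | [] => []
  | [g] => [g ++ [x]]
  | g :: rest => g :: pyAppendLast rest x

def group_by_concat_runs_py (transitions : List String) : List (List Int) :=
  (PySem.List.enumerate transitions).foldl
    (fun groups it =>
      if it.2 == "none" then pyAppendLast groups (it.1 + 1)
      else groups ++ [[it.1 + 1]])
    [[0]]

-- ===== PORT B =====
def group_by_concat_runs_py_alt (transitions : List String) : List (List Int) :=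
  let n : Int := (transitions.length : Int) + 1
  let cuts : List Int :=
    (PySem.List.enumerate transitions).filterMap
      (fun it => if it.2 != "none" then some (it.1 + 1) else none)
  ((cuts ++ [n]).foldl
      (fun (st : List (List Int) × Int) c => (st.1 ++ [PySem.List.pyRange st.2 c 1], c))
      ([], 0)).1

-- ===== PRECONDITION & SPEC =====
def Spec_group_by_concat_runs_py (transitions : List String) (out : List (List Int)) : Prop := out = group_by_concat_runs_py_alt transitions
instance (transitions : List String) (out : List (List Int)) : Decidable (Spec_group_by_concat_runs_py transitions out) := by unfold Spec_group_by_concat_runs_py; infer_instance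

-- ===== CLAIM (what is proved, stated in full; the proofs are below) =====
def Claim_equal_group_by_concat_runs_py : Prop := ∀ (transitions : List String), Dom_group_by_concat_runs_py transitions → Spec_group_by_concat_runs_py transitions (group_by_concat_runs_py transitions)

-- ===== LEMMAS AND PROOFS =====

-- proof-only abbreviations for the two pieces of B
def cutsOf (transitions : List String) : List Int :=
  (PySem.List.enumerate transitions).filterMap
    (fun it => if it.2 != "none" then some (it.1 + 1) else none)

def sliceStep (st : List (List Int) × Int) (c : Int) : List (List Int) × Int :=
  (st.1 ++ [PySem.List.pyRange st.2 c 1], c)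

theorem pyAppendLast_append (l : List (List Int)) (g : List Int) (x : Int) :
    pyAppendLast (l ++ [g]) x = l ++ [g ++ [x]] := by
  induction l with
  | nil => rfl
  | cons h t ih =>
    cases t with
    | nil => simp [pyAppendLast]
    | cons h2 t2 => simp [pyAppendLast] at ih ⊢; exact ih

theorem foldl_sliceStep_append (l : List Int) (st : List (List Int) × Int) (c : Int) :
    (l ++ [c]).foldl sliceStep st =
      (((l.foldl sliceStep st).1 ++ [PySem.List.pyRange (l.foldl sliceStep st).2 c 1]), c) := by
  rw [List.foldl_append]; rfl

theorem cutsOf_append (ts : List String) (t : String) :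
    cutsOf (ts ++ [t]) =
      cutsOf ts ++ (if t == "none" then [] else [((ts.length : Int) + 1)]) := by
  unfold cutsOf
  rw [PySem.List.enumerate_append]
  simp [PySem.List.enumerate, List.filterMap_append]
  split <;> rename_i h <;> simp_all [List.filterMap]

-- main invariant: A's result is B's partial fold plus the pending last range
theorem key (ts : List String) :
    group_by_concat_runs_py ts =
      ((cutsOf ts).foldl sliceStep ([], 0)).1 ++
        [PySem.List.pyRange ((cutsOf ts).foldl sliceStep ([], 0)).2 ((ts.length : Int) + 1) 1] ∧
    0 ≤ ((cutsOf ts).foldl sliceStep ([], 0)).2 ∧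
    ((cutsOf ts).foldl sliceStep ([], 0)).2 ≤ (ts.length : Int) := by
  induction ts using List.reverseRecOn with
  | nil =>
    refine ⟨by decide, by decide, by decide⟩
  | append_singleton ts t ih =>
    obtain ⟨hA, hlo, hhi⟩ := ih
    have hAstep : group_by_concat_runs_py (ts ++ [t]) =
        (if t == "none" then
          pyAppendLast (group_by_concat_runs_py ts) ((ts.length : Int) + 1)
        else group_by_concat_runs_py ts ++ [[(ts.length : Int) + 1]]) := by
      unfold group_by_concat_runs_py
      rw [PySem.List.enumerate_append, List.foldl_append]
      simp [PySem.List.enumerate]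
    rw [cutsOf_append]
    by_cases ht : t == "none"
    · rw [if_pos ht, List.append_nil]
      rw [hAstep, if_pos ht]
      refine ⟨?_, hlo, by simp; omega⟩
      rw [hA, pyAppendLast_append]
      have hle : ((cutsOf ts).foldl sliceStep ([], 0)).2 ≤ (ts.length : Int) + 1 := by omega
      rw [← PySem.List.pyRange_one_succ_right hle]
      simp
    · rw [if_neg ht, foldl_sliceStep_append]
      refine ⟨?_, by omega, by simp⟩
      rw [hAstep, if_neg ht]
      rw [hA]
      have : PySem.List.pyRange ((ts.length : Int) + 1) (((ts ++ [t]).length : Int) + 1) 1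
          = [((ts.length : Int) + 1)] := by
        simp
      rw [this]

-- ===== VERDICT (by name: the statement is the Claim_ definition above) =====
theorem group_by_concat_runs_py_spec : Claim_equal_group_by_concat_runs_py := by
  intro ts _
  unfold Spec_group_by_concat_runs_py group_by_concat_runs_py_alt
  obtain ⟨hA, _, _⟩ := key ts
  show group_by_concat_runs_py ts =
    (((cutsOf ts) ++ [(ts.length : Int) + 1]).foldl sliceStep ([], 0)).1
  rw [foldl_sliceStep_append, hA]
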